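-- pv_equiv track=rewrite | github.com/haixiangyan/leetcode-python | Amazon 3月OA真题/3/1639. K-Substring with K different characters.py | KSubstring
-- ===== SOURCE A (Python) =====
-- def KSubstring(stringIn, K):
--     if not stringIn or len(stringIn) < K:
--         return 0
--
--     store = {}
--     substrings = set([])
--     count = 0
--
--     # 初始化前 K 个
--     for i in range(K):
--         if stringIn[i] not in store:
--             store[stringIn[i]] = 0
--             count += 1
--
--         store[stringIn[i]] += 1
--
--     if count == K:
--         substrings.add(stringIn[:K])
--
--     for i in range(K, len(stringIn)):
--         # 去掉前面的字符
--         store[stringIn[i - K]] -= 1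
--         if store[stringIn[i - K]] == 0:
--             count -= 1
--
--         # 加上后面的新字符
--         if stringIn[i] not in store or store[stringIn[i]] == 0:
--             count += 1
--             store[stringIn[i]] = 0
--         store[stringIn[i]] += 1
--
--         # 判断是否是一个合格的子串
--         if count == K:
--             substrings.add(stringIn[i - K + 1:i + 1])
--
--     return len(substrings)
-- ===== SOURCE B (Python) =====
-- def KSubstring(stringIn, K):
--     if not stringIn or len(stringIn) < K:
--         return 0
--     subs = set()
--     for i in range(len(stringIn) - K + 1):
--         sub = stringIn[i:i + K]
--         if len(set(sub)) == K:
--             subs.add(sub)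
--     return len(subs)
-- ===== Notes on version B (the rewrite author's own statement) =====
-- stated objective: simpler
-- what changed: Replaces A's incremental sliding-window character-count dict (with its add/remove bookkeeping of a distinct-character counter) by a direct scan that recomputes each K-window's distinct-character count with set(sub) and collects the qualifying windows in a set.
import Mathlib
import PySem

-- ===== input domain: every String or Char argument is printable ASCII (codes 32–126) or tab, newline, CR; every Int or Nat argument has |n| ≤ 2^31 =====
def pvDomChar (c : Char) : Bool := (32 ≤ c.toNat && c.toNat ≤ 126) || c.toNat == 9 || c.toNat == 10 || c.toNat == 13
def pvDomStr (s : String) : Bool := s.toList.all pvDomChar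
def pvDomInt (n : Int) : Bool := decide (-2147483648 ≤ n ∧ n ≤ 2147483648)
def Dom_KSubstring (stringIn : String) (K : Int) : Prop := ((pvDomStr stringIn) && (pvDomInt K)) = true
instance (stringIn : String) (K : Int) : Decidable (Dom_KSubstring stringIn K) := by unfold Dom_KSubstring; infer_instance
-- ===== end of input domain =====

-- B replaces A's incremental sliding-window character-count dict by a direct per-window
-- recomputation of the distinct-character count (simpler, genuinely different algorithm);
-- A = B proved on Pre_ (A raises KeyError on non-empty input with K <= 0, excluded by Pre_).


-- ===== PORT A =====
-- Python string slices are modelled as their code-point lists (PySem.Str slices are the List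
-- versions on .toList); 'store[c] -= 1' / 'store[c] += 1' are ported with Dict.modify (default 0)
-- and string indexing with pyGetD: within Pre_ the dict key is always present and the index in
-- range, where these are exact (outside Pre_ the Python raises KeyError; nothing is claimed there).
def stepInitA (l : List Char) (sc : PySem.Dict Char Int × Int) (i : Int) :
    PySem.Dict Char Int × Int :=
  let c := PySem.List.pyGetD l i ' '
  let sc := if sc.1.contains c = false then (sc.1.insert c 0, sc.2 + 1) else sc
  (sc.1.modify c 0 (· + 1), sc.2)

def stepLoopA (l : List Char) (K : Int)
    (st : PySem.Dict Char Int × Int × PySem.Set (List Char)) (i : Int) :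
    PySem.Dict Char Int × Int × PySem.Set (List Char) :=
  let cold := PySem.List.pyGetD l (i - K) ' '
  let store := st.1.modify cold 0 (· - 1)
  let count := if store.getD cold 0 = 0 then st.2.1 - 1 else st.2.1
  let c := PySem.List.pyGetD l i ' '
  let sc : PySem.Dict Char Int × Int :=
    if store.contains c = false ∨ store.getD c 0 = 0 then (store.insert c 0, count + 1)
    else (store, count)
  let store := sc.1.modify c 0 (· + 1)
  let subs :=
    if sc.2 = K then st.2.2.add (PySem.List.slice l (some (i - K + 1)) (some (i + 1)))
    else st.2.2
  (store, sc.2, subs)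

def KSubstring (stringIn : String) (K : Int) : Int :=
  let l := stringIn.toList
  if l = [] ∨ (l.length : Int) < K then 0
  else
    let init := (PySem.List.pyRange 0 K 1).foldl (stepInitA l) (PySem.Dict.empty, 0)
    let subs0 : PySem.Set (List Char) :=
      if init.2 = K then PySem.Set.add PySem.Set.empty (PySem.List.slice l none (some K))
      else PySem.Set.empty
    let fin := (PySem.List.pyRange K (l.length : Int) 1).foldl (stepLoopA l K)
      (init.1, init.2, subs0)
    PySem.Set.len fin.2.2

-- ===== PORT B =====
def stepB (l : List Char) (K : Int) (subs : PySem.Set (List Char)) (i : Int) :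
    PySem.Set (List Char) :=
  let sub := PySem.List.slice l (some i) (some (i + K))
  if PySem.Set.len (PySem.Set.ofList sub) = K then subs.add sub else subs

def KSubstring_alt (stringIn : String) (K : Int) : Int :=
  let l := stringIn.toList
  if l = [] ∨ (l.length : Int) < K then 0
  else
    PySem.Set.len
      ((PySem.List.pyRange 0 ((l.length : Int) - K + 1) 1).foldl (stepB l K) PySem.Set.empty)

-- ===== PRECONDITION & SPEC =====
-- Pre_ excludes exactly the inputs on which A raises KeyError: a non-empty string with K ≤ 0
-- (A's count dict is empty when the shrink step first indexes it).
def Pre_KSubstring (stringIn : String) (K : Int) : Prop := stringIn = "" ∨ 1 ≤ K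
instance (stringIn : String) (K : Int) : Decidable (Pre_KSubstring stringIn K) := by
  unfold Pre_KSubstring; infer_instance

def pvWitness_KSubstring : String × Int := ("aba", 2)

def Spec_KSubstring (stringIn : String) (K : Int) (out : Int) : Prop := out = KSubstring_alt stringIn K
instance (stringIn : String) (K : Int) (out : Int) : Decidable (Spec_KSubstring stringIn K out) := by
  unfold Spec_KSubstring; infer_instance

-- ===== CLAIM (what is proved, stated in full; the proofs are below) =====
def Claim_equal_KSubstring : Prop := ∀ (stringIn : String) (K : Int), Dom_KSubstring stringIn K → Pre_KSubstring stringIn K → Spec_KSubstring stringIn K (KSubstring stringIn K)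

-- ===== LEMMAS AND PROOFS =====

theorem cnt_snoc (xs : List Char) (x c : Char) :
    (xs ++ [x]).count c = xs.count c + (if c = x then 1 else 0) := by
  by_cases h : c = x
  · subst h; simp
  · simp [List.count_append, h, Ne.symm h]

theorem fin_snoc (xs : List Char) (x : Char) :
    (xs ++ [x]).toFinset = insert x xs.toFinset := by
  rw [List.toFinset_append]
  simp [Finset.union_singleton]

theorem setLen_ofList (w : List Char) :
    PySem.Set.len (PySem.Set.ofList w) = (w.toFinset.card : Int) := by
  have hnd := PySem.Set.nodup_ofList (α := Char) w
  have hmem : (PySem.Set.ofList w).toFinset = w.toFinset := by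
    ext c; simp [PySem.Set.mem_ofList]
  have h : (PySem.Set.ofList w).length = w.toFinset.card := by
    rw [← hmem, List.toFinset_card_of_nodup hnd]
  simp [PySem.Set.len, h]

theorem slice_win (l : List Char) (t k : Nat) :
    PySem.List.slice l (some ((t : Nat) : Int)) (some (((t : Nat) : Int) + ((k : Nat) : Int)))
      = (l.drop t).take k := by
  have := PySem.List.slice_natCast (xs := l) (a := t) (b := t + k)
  push_cast at this
  simpa using this

theorem initA_inv (l : List Char) (m : Nat) (hm : m ≤ l.length) :
    (∀ c, ((PySem.List.pyRange 0 (m : Int) 1).foldl (stepInitA l) (PySem.Dict.empty, 0)).1.contains c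
        = decide (c ∈ l.take m)) ∧
    (∀ c, ((PySem.List.pyRange 0 (m : Int) 1).foldl (stepInitA l) (PySem.Dict.empty, 0)).1.getD c 0
        = ((l.take m).count c : Int)) ∧
    ((PySem.List.pyRange 0 (m : Int) 1).foldl (stepInitA l) (PySem.Dict.empty, 0)).2
        = ((l.take m).toFinset.card : Int) := by
  induction m with
  | zero =>
      simp [PySem.List.pyRange_one_eq_nil, PySem.Dict.contains_empty, PySem.Dict.getD_empty]
  | succ m ih =>
      have hm' : m < l.length := by omega
      obtain ⟨ihc, ihd, ihn⟩ := ih (by omega)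
      have hrange : PySem.List.pyRange 0 ((m + 1 : Nat) : Int) 1
          = PySem.List.pyRange 0 (m : Nat) 1 ++ [(m : Int)] := by
        push_cast
        exact PySem.List.pyRange_one_succ_right (by positivity)
      have hc : PySem.List.pyGetD l ((m : Nat) : Int) ' ' = l[m] :=
        PySem.List.pyGetD_ofNat l m ' ' hm'
      have htake : l.take (m + 1) = l.take m ++ [l[m]] := by
        rw [List.take_succ]; simp [List.getElem?_eq_getElem hm']
      rw [hrange, List.foldl_append]
      set P := (PySem.List.pyRange 0 (m : Nat) 1).foldl (stepInitA l) (PySem.Dict.empty, 0) with hP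
      simp only [List.foldl_cons, List.foldl_nil]
      by_cases hmem : l[m] ∈ l.take m
      · have hstep : stepInitA l P ((m : Nat) : Int) = (P.1.modify l[m] 0 (· + 1), P.2) := by
          simp only [stepInitA, hc]; rw [ihc]; simp [hmem]
        rw [hstep]
        refine ⟨?_, ?_, ?_⟩
        · intro c
          rw [PySem.Dict.contains_modify, ihc c, htake]
          by_cases h : c = l[m] <;> simp [h, -List.take_append_getElem]
        · intro c
          rw [PySem.Dict.getD_modify, htake, cnt_snoc]
          by_cases h : c = l[m]
          · subst h; rw [if_pos rfl, ihd]; push_cast; simp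
          · rw [if_neg h, ihd]; push_cast; simp [h]
        · rw [htake, fin_snoc]
          simpa [Finset.insert_eq_self.mpr (List.mem_toFinset.mpr hmem)] using ihn
      · have hstep : stepInitA l P ((m : Nat) : Int)
            = ((P.1.insert l[m] 0).modify l[m] 0 (· + 1), P.2 + 1) := by
          simp only [stepInitA, hc]; rw [ihc]; simp [hmem]
        rw [hstep]
        refine ⟨?_, ?_, ?_⟩
        · intro c
          rw [PySem.Dict.contains_modify, PySem.Dict.contains_insert, ihc c, htake]
          by_cases h : c = l[m] <;> simp [h, -List.take_append_getElem]
        · intro c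
          rw [PySem.Dict.getD_modify, htake, cnt_snoc]
          by_cases h : c = l[m]
          · subst h
            rw [if_pos rfl, PySem.Dict.getD_insert, if_pos rfl]
            push_cast
            simp [List.count_eq_zero_of_not_mem hmem]
          · rw [if_neg h, PySem.Dict.getD_insert, if_neg h, ihd]
            push_cast; simp [h]
        · rw [htake, fin_snoc, Finset.card_insert_of_notMem (by simpa using hmem), ihn]
          push_cast; ring

theorem loopA_inv (l : List Char) (k : Nat) (hk : 1 ≤ k)
    (s0 : PySem.Dict Char Int × Int × PySem.Set (List Char))
    (h1 : ∀ c, s0.1.getD c 0 = ((l.take k).count c : Int))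
    (h2 : s0.2.1 = ((l.take k).toFinset.card : Int))
    (h3 : s0.2.2 = (PySem.List.pyRange 0 1 1).foldl (stepB l (k : Int)) PySem.Set.empty)
    (t : Nat) (ht : k + t ≤ l.length) :
    (∀ c, ((PySem.List.pyRange (k : Int) ((k + t : Nat) : Int) 1).foldl (stepLoopA l (k : Int)) s0).1.getD c 0
        = (((l.drop t).take k).count c : Int)) ∧
    ((PySem.List.pyRange (k : Int) ((k + t : Nat) : Int) 1).foldl (stepLoopA l (k : Int)) s0).2.1
        = (((l.drop t).take k).toFinset.card : Int) ∧
    ((PySem.List.pyRange (k : Int) ((k + t : Nat) : Int) 1).foldl (stepLoopA l (k : Int)) s0).2.2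
        = (PySem.List.pyRange 0 ((t : Int) + 1) 1).foldl (stepB l (k : Int)) PySem.Set.empty := by
  induction t with
  | zero =>
      have : PySem.List.pyRange (k : Int) ((k + 0 : Nat) : Int) 1 = [] := by
        apply PySem.List.pyRange_one_eq_nil; push_cast; omega
      rw [this]
      simpa using ⟨h1, h2, h3⟩
  | succ t ih =>
      have htn : k + t ≤ l.length := by omega
      have htl : t < l.length := by omega
      have ht1l : t + 1 ≤ l.length := by omega
      have hktl : k + t < l.length := by omega
      have hrange : PySem.List.pyRange (k : Int) ((k + (t + 1) : Nat) : Int) 1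
          = PySem.List.pyRange (k : Int) ((k + t : Nat) : Int) 1 ++ [((k + t : Nat) : Int)] := by
        have : ((k + (t + 1) : Nat) : Int) = ((k + t : Nat) : Int) + 1 := by push_cast; ring
        rw [this]
        exact PySem.List.pyRange_one_succ_right (by push_cast; omega)
      rw [hrange, List.foldl_append]
      simp only [List.foldl_cons, List.foldl_nil]
      set Q := (PySem.List.pyRange (k : Int) ((k + t : Nat) : Int) 1).foldl (stepLoopA l (k : Int)) s0 with hQ
      obtain ⟨ihd, ihn, ihs⟩ := ih htn
      -- notation for the windows
      set W' : List Char := (l.drop (t + 1)).take (k - 1) with hW'def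
      have hW : (l.drop t).take k = l[t] :: W' := by
        rw [List.drop_eq_getElem_cons htl]
        conv_lhs => rw [show k = (k - 1) + 1 by omega]
        rw [List.take_succ_cons]
        rfl
      have hgetnew : (l.drop (t + 1))[k - 1]? = some l[k + t] := by
        rw [List.getElem?_drop, show t + 1 + (k - 1) = k + t by omega,
           List.getElem?_eq_getElem hktl]
      have hWnew : (l.drop (t + 1)).take k = W' ++ [l[k + t]] := by
        conv_lhs => rw [show k = (k - 1) + 1 by omega, List.take_succ]
        rw [hgetnew]
        rfl
      -- the two characters
      have hcold : PySem.List.pyGetD l (((k + t : Nat) : Int) - (k : Int)) ' ' = l[t] := by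
        rw [show ((k + t : Nat) : Int) - (k : Int) = ((t : Nat) : Int) by push_cast; ring]
        exact PySem.List.pyGetD_ofNat l t ' ' htl
      have hcnew : PySem.List.pyGetD l ((k + t : Nat) : Int) ' ' = l[k + t] :=
        PySem.List.pyGetD_ofNat l (k + t) ' ' hktl
      -- step 1: decrement the old character
      have hst1 : ∀ c, (Q.1.modify l[t] 0 (· - 1)).getD c 0 = ((W'.count c : Nat) : Int) := by
        intro c
        rw [PySem.Dict.getD_modify]
        by_cases h : c = l[t]
        · subst h
          rw [if_pos rfl, ihd, hW]
          simp [List.count_cons]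
        · rw [if_neg h, ihd, hW]
          simp [List.count_cons, Ne.symm h]
      have hcnt1 : (if (Q.1.modify l[t] 0 (· - 1)).getD l[t] 0 = 0 then Q.2.1 - 1 else Q.2.1)
          = ((W'.toFinset.card : Nat) : Int) := by
        simp only [hst1, ihn, hW]
        by_cases h : l[t] ∈ W'
        · rw [if_neg (by simp [List.count_eq_zero]; exact h)]
          rw [List.toFinset_cons, Finset.insert_eq_self.mpr (List.mem_toFinset.mpr h)]
        · rw [if_pos (by simp [List.count_eq_zero_of_not_mem h])]
          rw [List.toFinset_cons, Finset.card_insert_of_notMem (by simpa using h)]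
          push_cast; ring
      -- the slices both ports add are the new window
      have hsliceA : PySem.List.slice l (some (((k + t : Nat) : Int) - (k : Int) + 1))
          (some (((k + t : Nat) : Int) + 1)) = (l.drop (t + 1)).take k := by
        rw [show ((k + t : Nat) : Int) - (k : Int) + 1 = (((t + 1 : Nat) : Nat) : Int) by push_cast; ring,
            show ((k + t : Nat) : Int) + 1 = (((t + 1 : Nat) : Nat) : Int) + ((k : Nat) : Int) by push_cast; ring]
        exact slice_win l (t + 1) k
      have hsliceB : PySem.List.slice l (some ((t : Int) + 1)) (some ((t : Int) + 1 + (k : Int)))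
          = (l.drop (t + 1)).take k := by
        rw [show ((t : Int) + 1) = (((t + 1 : Nat) : Nat) : Int) by push_cast; ring]
        exact slice_win l (t + 1) k
      -- B's fold, one more step
      have hrangeB : PySem.List.pyRange 0 (((t + 1 : Nat) : Int) + 1) 1
          = PySem.List.pyRange 0 ((t : Int) + 1) 1 ++ [(t : Int) + 1] := by
        rw [show (((t + 1 : Nat) : Int) + 1) = ((t : Int) + 1) + 1 by push_cast; ring]
        exact PySem.List.pyRange_one_succ_right (by omega)
      rw [hrangeB, List.foldl_append]
      simp only [List.foldl_cons, List.foldl_nil, stepLoopA, stepB, hcold, hcnew, hcnt1,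
        hsliceA, hsliceB, ← ihs, setLen_ofList]
      by_cases hmem : l[k + t] ∈ W'
      · have hcondF : ¬((Q.1.modify l[t] 0 (· - 1)).contains l[k + t] = false
            ∨ (Q.1.modify l[t] 0 (· - 1)).getD l[k + t] 0 = 0) := by
          rintro (h | h)
          · have := PySem.Dict.getD_of_not_contains (Q.1.modify l[t] 0 (· - 1)) (0 : Int) h
            rw [hst1] at this
            have := List.count_pos_iff.mpr hmem
            omega
          · rw [hst1] at h
            have := List.count_pos_iff.mpr hmem
            omega
        rw [if_neg hcondF]
        have hcard : ((W'.toFinset.card : Nat) : Int) = (((l.drop (t + 1)).take k).toFinset.card : Int) := by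
          rw [hWnew, fin_snoc, Finset.insert_eq_self.mpr (List.mem_toFinset.mpr hmem)]
        refine ⟨?_, ?_, ?_⟩
        · intro c
          rw [PySem.Dict.getD_modify, hWnew]
          by_cases h : c = l[k + t]
          · subst h
            rw [if_pos rfl, hst1, cnt_snoc]
            push_cast; simp
          · rw [if_neg h, hst1, cnt_snoc]
            push_cast; simp [h]
        · exact hcard
        · rw [hcard]
      · have hcondT : (Q.1.modify l[t] 0 (· - 1)).contains l[k + t] = false
            ∨ (Q.1.modify l[t] 0 (· - 1)).getD l[k + t] 0 = 0 := by
          right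
          rw [hst1, List.count_eq_zero_of_not_mem hmem]
          rfl
        rw [if_pos hcondT]
        have hcard : ((W'.toFinset.card : Nat) : Int) + 1 = (((l.drop (t + 1)).take k).toFinset.card : Int) := by
          rw [hWnew, fin_snoc, Finset.card_insert_of_notMem (by simpa using hmem)]
          push_cast; ring
        refine ⟨?_, ?_, ?_⟩
        · intro c
          rw [PySem.Dict.getD_modify, hWnew]
          by_cases h : c = l[k + t]
          · subst h
            rw [if_pos rfl, PySem.Dict.getD_insert, if_pos rfl, cnt_snoc]
            push_cast
            simp [List.count_eq_zero_of_not_mem hmem]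
          · rw [if_neg h, PySem.Dict.getD_insert, if_neg h, hst1, cnt_snoc]
            push_cast; simp [h]
        · exact hcard
        · rw [hcard]

theorem KSubstring_main (s : String) (K : Int) (hpre : Pre_KSubstring s K) :
    KSubstring s K = KSubstring_alt s K := by
  unfold KSubstring KSubstring_alt
  set l := s.toList with hl
  by_cases h0 : l = [] ∨ (l.length : Int) < K
  · rw [if_pos h0, if_pos h0]
  · rw [if_neg h0, if_neg h0]
    push_neg at h0
    obtain ⟨hne, hlen⟩ := h0
    have hK1 : 1 ≤ K := by
      rcases hpre with h | h
      · exact absurd (by rw [hl, h]; rfl) hne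
      · exact h
    have hK : K = (K.toNat : Int) := by omega
    set k := K.toNat with hkdef
    have hk1 : 1 ≤ k := by omega
    have hkn : k ≤ l.length := by omega
    rw [hK] at hlen ⊢
    obtain ⟨_, id_, in_⟩ := initA_inv l k hkn
    -- the initial substring set is B's fold over the first window alone
    have hr1 : PySem.List.pyRange 0 1 1 = [(0 : Int)] := by
      simpa using PySem.List.pyRange_one_singleton (a := 0)
    have hsubs0 :
        (if ((PySem.List.pyRange 0 (k : Int) 1).foldl (stepInitA l) (PySem.Dict.empty, 0)).2 = (k : Int)
           then PySem.Set.add PySem.Set.empty (PySem.List.slice l none (some (k : Int)))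
           else PySem.Set.empty)
        = (PySem.List.pyRange 0 1 1).foldl (stepB l (k : Int)) PySem.Set.empty := by
      rw [in_, hr1]
      simp only [List.foldl_cons, List.foldl_nil, stepB]
      rw [show (0 : Int) + (k : Int) = (k : Int) by ring, PySem.List.slice_zero_start,
          PySem.List.slice_to l (show (0 : Int) ≤ (k : Int) by omega), setLen_ofList]
      norm_num
    have hbA : PySem.List.pyRange (k : Int) ((l.length : Int)) 1
        = PySem.List.pyRange (k : Int) ((k + (l.length - k) : Nat) : Int) 1 := by
      rw [show ((k + (l.length - k) : Nat) : Int) = (l.length : Int) by push_cast; omega]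
    have hbB : (l.length : Int) - (k : Int) + 1 = ((l.length - k : Nat) : Int) + 1 := by
      push_cast; omega
    rw [hbA, hbB]
    obtain ⟨-, -, hset⟩ := loopA_inv l k hk1
      (((PySem.List.pyRange 0 (k : Int) 1).foldl (stepInitA l) (PySem.Dict.empty, 0)).1,
       ((PySem.List.pyRange 0 (k : Int) 1).foldl (stepInitA l) (PySem.Dict.empty, 0)).2,
       (if ((PySem.List.pyRange 0 (k : Int) 1).foldl (stepInitA l) (PySem.Dict.empty, 0)).2 = (k : Int)
          then PySem.Set.add PySem.Set.empty (PySem.List.slice l none (some (k : Int)))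
          else PySem.Set.empty))
      id_ in_ hsubs0 (l.length - k) (by omega)
    exact congrArg PySem.Set.len hset

-- ===== VERDICT (by name: the statement is the Claim_ definition above) =====
theorem KSubstring_spec : Claim_equal_KSubstring := by
  intro s K _ hpre
  unfold Spec_KSubstring
  exact KSubstring_main s K hpre
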